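-- pv_equiv track=rewrite | github.com/meralegre/capstone | py_files/processing_functions.py | generate_combinations_og
-- ===== SOURCE A (Python) =====
-- def generate_combinations_og(list_a, list_b):
--     """
--     Generates a list of combinations by rotating elements between two lists.
--
--     Parameters:
--     list_a (list): First list of elements.
--     list_b (list): Second list of elements.
--
--     Returns:
--     list: A list of combinations where elements have been rotated between the two lists.
--     """
--     n = len(list_a)
--     combinations = []
--
--     # avoid modifying the original lists
--     current_a = list_a[:]
--     current_b = list_b[:]
--
--     # n rounds to cycle through each list
--     for _ in range(n):
--         combinations.append([current_a[:], current_b[:]])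
--
--         # pop the last element from A and push it to the front of B
--         element_a = current_a.pop()
--         current_b.insert(0, element_a)
--
--         # pop the last element from B and push it to the front of A
--         element_b = current_b.pop()
--         current_a.insert(0, element_b)
--
--     # last step: mirrored lists
--     combinations.append([current_a[:], current_b[:]])
--
--     return combinations
-- ===== SOURCE B (Python) =====
-- def generate_combinations_og(list_a, list_b):
--     """
--     Same result as A, computed in closed form: one swap round right-rotates
--     the concatenation list_a + list_b by one, so snapshot i is that rotation
--     by i, split back at len(list_a).
--     """
--     n = len(list_a)
--     combined = list_a + list_b
--     m = len(combined)
--     out = []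
--     for i in range(n + 1):
--         rot = combined[m - i:] + combined[:m - i]
--         out.append([rot[:n], rot[n:]])
--     return out
-- ===== Notes on version B (the rewrite author's own statement) =====
-- stated objective: simpler
-- what changed: Replaces the round-by-round pop/insert mutation of both lists with a closed-form slice rotation of the concatenated list, split back at len(list_a) for each snapshot.
import Mathlib
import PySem

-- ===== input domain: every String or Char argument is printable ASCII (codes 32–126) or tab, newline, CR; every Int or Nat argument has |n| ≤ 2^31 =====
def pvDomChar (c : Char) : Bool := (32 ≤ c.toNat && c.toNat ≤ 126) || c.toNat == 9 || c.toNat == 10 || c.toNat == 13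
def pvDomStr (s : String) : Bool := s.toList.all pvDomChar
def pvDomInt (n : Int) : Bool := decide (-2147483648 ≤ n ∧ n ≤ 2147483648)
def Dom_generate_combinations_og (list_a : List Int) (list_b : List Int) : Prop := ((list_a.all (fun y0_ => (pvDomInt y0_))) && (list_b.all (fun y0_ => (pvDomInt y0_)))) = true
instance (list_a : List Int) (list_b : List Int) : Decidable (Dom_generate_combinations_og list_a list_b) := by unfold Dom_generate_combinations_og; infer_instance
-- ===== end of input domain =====

-- B computes each snapshot as a closed-form rotation of list_a ++ list_b instead of
-- simulating A's pop/insert rounds; proved equal to A on all inputs (A is total: its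
-- pops always act on nonempty lists). A copies its arguments, so neither mutates them.


-- ===== PORT A =====
-- the for-loop of A: k rounds remain; state = (current_a, current_b, combinations)
def ogLoop : Nat → List Int → List Int → List (List (List Int)) → List (List (List Int))
  | 0, ca, cb, acc => acc ++ [[ca, cb]]          -- last step: mirrored lists
  | k + 1, ca, cb, acc =>
    let acc2 := acc ++ [[ca, cb]]                -- combinations.append([current_a[:], current_b[:]])
    match ca.getLast? with
    | none => acc2                               -- current_a.pop() would raise; unreachable (ca keeps length = len(list_a) ≥ k+1)
    | some ea =>                                 -- element_a = current_a.pop()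
      let ca2 := ca.dropLast
      let cb2 := ea :: cb                        -- current_b.insert(0, element_a)
      let eb := cb2.getLast (by simp)            -- element_b = current_b.pop() (cb2 is a cons, never raises)
      ogLoop k (eb :: ca2) cb2.dropLast acc2     -- current_a.insert(0, element_b)

def generate_combinations_og (list_a : List Int) (list_b : List Int) : List (List (List Int)) :=
  ogLoop list_a.length list_a list_b []

-- ===== PORT B =====
def generate_combinations_og_alt (list_a : List Int) (list_b : List Int) : List (List (List Int)) :=
  let n := list_a.length
  let combined := list_a ++ list_b
  let m := combined.length
  (List.range (n + 1)).map (fun i =>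
    let rot := combined.drop (m - i) ++ combined.take (m - i)
    [rot.take n, rot.drop n])

-- ===== PRECONDITION & SPEC =====
def Spec_generate_combinations_og (list_a : List Int) (list_b : List Int) (out : List (List (List Int))) : Prop := out = generate_combinations_og_alt list_a list_b
instance (list_a : List Int) (list_b : List Int) (out : List (List (List Int))) : Decidable (Spec_generate_combinations_og list_a list_b out) := by unfold Spec_generate_combinations_og; infer_instance

-- ===== CLAIM (what is proved, stated in full; the proofs are below) =====
def Claim_equal_generate_combinations_og : Prop := ∀ (list_a : List Int) (list_b : List Int), Dom_generate_combinations_og list_a list_b → Spec_generate_combinations_og list_a list_b (generate_combinations_og list_a list_b)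

-- ===== LEMMAS AND PROOFS =====

-- snapshot i of the rotation of c, split at n (proof-side abbreviation of B's map body)
def rotSnap (c : List Int) (n i : Nat) : List (List Int) :=
  let rot := c.drop (c.length - i) ++ c.take (c.length - i)
  [rot.take n, rot.drop n]

lemma rotSnap_zero (ca cb : List Int) (n : Nat) : rotSnap (ca ++ cb) n 0 = [(ca ++ cb).take n, (ca ++ cb).drop n] := by
  unfold rotSnap
  rw [Nat.sub_zero, List.drop_length, List.take_length, List.nil_append]

-- one swap round advances the rotation index by one
lemma rotStep (l : List Int) (n j : Nat) (hj : j + 1 ≤ l.length) :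
    rotSnap (l.rotate (l.length - 1)) n j = rotSnap l n (j + 1) := by
  unfold rotSnap
  simp only [List.length_rotate]
  have key : (l.rotate (l.length - 1)).drop (l.length - j) ++ (l.rotate (l.length - 1)).take (l.length - j)
      = l.drop (l.length - (j + 1)) ++ l.take (l.length - (j + 1)) := by
    rw [← List.rotate_eq_drop_append_take (by simp),
        ← List.rotate_eq_drop_append_take (Nat.sub_le _ _), List.rotate_rotate]
    have h2 : l.length - 1 + (l.length - j) = l.length + (l.length - (j + 1)) := by omega
    rw [h2, ← List.rotate_rotate, List.rotate_length]
  rw [key]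

-- unfolding one iteration of A's loop when current_a is nonempty
lemma ogLoop_succ (k : Nat) (ca cb : List Int) (acc : List (List (List Int))) (hca : ca ≠ []) :
    ogLoop (k + 1) ca cb acc
      = ogLoop k ((ca.getLast hca :: cb).getLast (by simp) :: ca.dropLast)
          (ca.getLast hca :: cb).dropLast (acc ++ [[ca, cb]]) := by
  rw [ogLoop, List.getLast?_eq_some_getLast (h := hca)]

-- one round right-rotates the concatenated list by one
lemma combStep (ca cb : List Int) (hca : ca ≠ []) :
    ((ca.getLast hca :: cb).getLast (by simp) :: ca.dropLast) ++ (ca.getLast hca :: cb).dropLast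
      = (ca ++ cb).rotate ((ca ++ cb).length - 1) := by
  have hm : 0 < ca.length := List.length_pos_iff.mpr hca
  rcases List.eq_nil_or_concat cb with rfl | ⟨cb', x, rfl⟩
  · simp only [List.getLast_singleton, List.dropLast_singleton, List.append_nil]
    rw [List.rotate_eq_drop_append_take (Nat.sub_le _ _), List.drop_length_sub_one hca,
        List.dropLast_eq_take]
    simp
  · simp only [List.concat_eq_append]
    have h1 : (ca.getLast hca :: (cb' ++ [x])).getLast (by simp) = x := by simp
    have h2 : (ca.getLast hca :: (cb' ++ [x])).dropLast = ca.getLast hca :: cb' := by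
      rw [List.dropLast_cons_of_ne_nil (by simp)]
      simp
    rw [h1, h2]
    have hlen : (ca ++ (cb' ++ [x])).length - 1 = (ca ++ cb').length := by
      simp [List.length_append]
    rw [List.rotate_eq_drop_append_take (Nat.sub_le _ _), hlen,
        show ca ++ (cb' ++ [x]) = (ca ++ cb') ++ [x] by simp,
        List.drop_left, List.take_left]
    have h3 : ca.dropLast ++ ca.getLast hca :: cb' = ca ++ cb' := by
      rw [show ca.getLast hca :: cb' = [ca.getLast hca] ++ cb' from rfl, ← List.append_assoc,
          List.dropLast_concat_getLast hca]
    simp [h3]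

lemma ogLoop_eq (k : Nat) : ∀ (ca cb : List Int) (acc : List (List (List Int))),
    k ≤ ca.length →
    ogLoop k ca cb acc
      = acc ++ (List.range (k + 1)).map (fun i => rotSnap (ca ++ cb) ca.length i) := by
  induction k with
  | zero =>
    intro ca cb acc _
    rw [List.range_succ]
    simp only [ogLoop, List.range_zero, List.nil_append, List.map_cons, List.map_nil]
    rw [rotSnap_zero, List.take_left, List.drop_left]
  | succ k ih =>
    intro ca cb acc hk
    have hca : ca ≠ [] := by intro h; subst h; simp at hk
    have hlen2 : ((ca.getLast hca :: cb).getLast (by simp) :: ca.dropLast).length = ca.length := by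
      simp [List.length_dropLast]
      omega
    rw [ogLoop_succ k ca cb acc hca, ih _ _ _ (by omega), hlen2, combStep ca cb hca]
    have hshift : ∀ i ∈ List.range (k + 1),
        rotSnap ((ca ++ cb).rotate ((ca ++ cb).length - 1)) ca.length i
          = rotSnap (ca ++ cb) ca.length (i + 1) := by
      intro i hi
      have hi' : i < k + 1 := List.mem_range.mp hi
      exact rotStep (ca ++ cb) ca.length i (by simp [List.length_append]; omega)
    rw [List.map_congr_left hshift]
    have hsplit : (List.range (k + 1 + 1)).map (fun i => rotSnap (ca ++ cb) ca.length i)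
        = rotSnap (ca ++ cb) ca.length 0
            :: (List.range (k + 1)).map (fun i => rotSnap (ca ++ cb) ca.length (i + 1)) := by
      rw [List.range_succ_eq_map]
      simp [Function.comp]
    rw [hsplit, rotSnap_zero, List.take_left, List.drop_left]
    simp

-- ===== VERDICT (by name: the statement is the Claim_ definition above) =====
theorem generate_combinations_og_spec : Claim_equal_generate_combinations_og := by
  intro a b _
  unfold Spec_generate_combinations_og generate_combinations_og generate_combinations_og_alt
  rw [ogLoop_eq a.length a b [] le_rfl]
  simp [rotSnap]
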